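-- pv_equiv track=rewrite | github.com/Yeshua-Obi/Baron_DAM | backend/server.py | mock_ai_categorize
-- ===== SOURCE A (Python) =====
-- def mock_ai_categorize(filename: str, mime_type: str) -> tuple:
--     """
--     Mock AI categorization based on filename patterns.
--     Will be replaced with CLIP model later.
--     """
--     filename_lower = filename.lower()
--
--     # Category detection based on filename patterns
--     if any(kw in filename_lower for kw in ['render', '3d', 'viz', 'cgi', 'visual']):
--         category = "Render"
--         tags = ["3D Visualization", "CGI"]
--     elif any(kw in filename_lower for kw in ['floor', 'plan', 'layout', 'fp']):
--         category = "Floor Plan"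
--         tags = ["Technical Drawing", "Layout"]
--     elif any(kw in filename_lower for kw in ['elevation', 'elev', 'facade', 'front', 'side']):
--         category = "Elevation"
--         tags = ["Technical Drawing", "Facade"]
--     elif any(kw in filename_lower for kw in ['site', 'photo', 'construction', 'progress', 'img']):
--         category = "Site Photo"
--         tags = ["Documentation", "Progress"]
--     elif any(kw in filename_lower for kw in ['sketch', 'concept', 'hand', 'draft']):
--         category = "Sketch"
--         tags = ["Concept", "Hand Drawing"]
--     elif any(kw in filename_lower for kw in ['section', 'cut', 'cross']):
--         category = "Section"
--         tags = ["Technical Drawing", "Cross Section"]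
--     elif any(kw in filename_lower for kw in ['detail', 'dtl', 'node']):
--         category = "Detail"
--         tags = ["Technical Drawing", "Construction Detail"]
--     else:
--         category = "Uncategorized"
--         tags = []
--
--     return category, tags
-- ===== SOURCE B (Python) =====
-- # Exhaustive keyword scoring: collect the priority of every matching keyword
-- # from a flat keyword->priority dict, then take the minimum priority (best rule).
-- KEYWORD_PRIORITY = {
--     'render': 0, '3d': 0, 'viz': 0, 'cgi': 0, 'visual': 0,
--     'floor': 1, 'plan': 1, 'layout': 1, 'fp': 1,
--     'elevation': 2, 'elev': 2, 'facade': 2, 'front': 2, 'side': 2,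
--     'site': 3, 'photo': 3, 'construction': 3, 'progress': 3, 'img': 3,
--     'sketch': 4, 'concept': 4, 'hand': 4, 'draft': 4,
--     'section': 5, 'cut': 5, 'cross': 5,
--     'detail': 6, 'dtl': 6, 'node': 6,
-- }
--
-- CATEGORIES = [
--     ("Render", ["3D Visualization", "CGI"]),
--     ("Floor Plan", ["Technical Drawing", "Layout"]),
--     ("Elevation", ["Technical Drawing", "Facade"]),
--     ("Site Photo", ["Documentation", "Progress"]),
--     ("Sketch", ["Concept", "Hand Drawing"]),
--     ("Section", ["Technical Drawing", "Cross Section"]),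
--     ("Detail", ["Technical Drawing", "Construction Detail"]),
-- ]
--
-- def mock_ai_categorize(filename: str, mime_type: str) -> tuple:
--     fl = filename.lower()
--     hits = [p for kw, p in KEYWORD_PRIORITY.items() if kw in fl]
--     if not hits:
--         return "Uncategorized", []
--     return CATEGORIES[min(hits)]
-- ===== Notes on version B (the rewrite author's own statement) =====
-- stated objective: alternative
-- what changed: Instead of an ordered short-circuit if/elif ladder over per-category keyword lists, B does an exhaustive pass over a flat keyword->priority dict, collects the priorities of ALL matching keywords, and indexes a category table by the minimum priority.
import Mathlib
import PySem

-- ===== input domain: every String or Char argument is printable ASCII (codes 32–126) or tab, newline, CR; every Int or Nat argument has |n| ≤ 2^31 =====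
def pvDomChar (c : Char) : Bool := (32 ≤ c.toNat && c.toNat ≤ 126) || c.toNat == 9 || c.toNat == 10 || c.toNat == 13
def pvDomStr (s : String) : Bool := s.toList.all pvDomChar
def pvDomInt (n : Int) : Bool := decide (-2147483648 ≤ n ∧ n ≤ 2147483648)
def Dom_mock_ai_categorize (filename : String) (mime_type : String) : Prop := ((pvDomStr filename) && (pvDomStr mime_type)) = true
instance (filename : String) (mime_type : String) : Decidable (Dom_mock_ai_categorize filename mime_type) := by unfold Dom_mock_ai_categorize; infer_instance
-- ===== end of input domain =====

-- B replaces the ordered if/elif ladder with an exhaustive scan of a flat keyword->priority dict,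
-- taking the minimum priority of all matching keywords to index a category table (objective: alternative).


-- ===== PORT A =====
def mock_ai_categorize (filename : String) (_mime_type : String) : String × List String :=
  let filename_lower := PySem.Str.lower filename
  if ["render", "3d", "viz", "cgi", "visual"].any (fun kw => PySem.Str.isIn kw filename_lower) then
    ("Render", ["3D Visualization", "CGI"])
  else if ["floor", "plan", "layout", "fp"].any (fun kw => PySem.Str.isIn kw filename_lower) then
    ("Floor Plan", ["Technical Drawing", "Layout"])
  else if ["elevation", "elev", "facade", "front", "side"].any (fun kw => PySem.Str.isIn kw filename_lower) then
    ("Elevation", ["Technical Drawing", "Facade"])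
  else if ["site", "photo", "construction", "progress", "img"].any (fun kw => PySem.Str.isIn kw filename_lower) then
    ("Site Photo", ["Documentation", "Progress"])
  else if ["sketch", "concept", "hand", "draft"].any (fun kw => PySem.Str.isIn kw filename_lower) then
    ("Sketch", ["Concept", "Hand Drawing"])
  else if ["section", "cut", "cross"].any (fun kw => PySem.Str.isIn kw filename_lower) then
    ("Section", ["Technical Drawing", "Cross Section"])
  else if ["detail", "dtl", "node"].any (fun kw => PySem.Str.isIn kw filename_lower) then
    ("Detail", ["Technical Drawing", "Construction Detail"])
  else
    ("Uncategorized", [])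

-- ===== PORT B =====
-- the KEYWORD_PRIORITY dict of Source B as an association list in insertion order (all keys distinct)
def pvKeywordPriority : List (String × Int) :=
  [("render", 0), ("3d", 0), ("viz", 0), ("cgi", 0), ("visual", 0),
   ("floor", 1), ("plan", 1), ("layout", 1), ("fp", 1),
   ("elevation", 2), ("elev", 2), ("facade", 2), ("front", 2), ("side", 2),
   ("site", 3), ("photo", 3), ("construction", 3), ("progress", 3), ("img", 3),
   ("sketch", 4), ("concept", 4), ("hand", 4), ("draft", 4),
   ("section", 5), ("cut", 5), ("cross", 5),
   ("detail", 6), ("dtl", 6), ("node", 6)]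

def pvCategories : List (String × List String) :=
  [("Render", ["3D Visualization", "CGI"]),
   ("Floor Plan", ["Technical Drawing", "Layout"]),
   ("Elevation", ["Technical Drawing", "Facade"]),
   ("Site Photo", ["Documentation", "Progress"]),
   ("Sketch", ["Concept", "Hand Drawing"]),
   ("Section", ["Technical Drawing", "Cross Section"]),
   ("Detail", ["Technical Drawing", "Construction Detail"])]

def mock_ai_categorize_alt (filename : String) (_mime_type : String) : String × List String :=
  let fl := PySem.Str.lower filename
  let hits := (pvKeywordPriority.filter (fun kp => PySem.Str.isIn kp.1 fl)).map Prod.snd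
  match PySem.List.min? hits (fun y => y) with
  | none => ("Uncategorized", [])
  | some p => (PySem.List.pyGet? pvCategories p).getD ("Uncategorized", [])
    -- CATEGORIES[min(hits)]; the index is provably in range, .getD keeps the port total

-- ===== PRECONDITION & SPEC =====
def Spec_mock_ai_categorize (filename : String) (mime_type : String) (out : String × List String) : Prop := out = mock_ai_categorize_alt filename mime_type
instance (filename : String) (mime_type : String) (out : String × List String) : Decidable (Spec_mock_ai_categorize filename mime_type out) := by unfold Spec_mock_ai_categorize; infer_instance

-- ===== CLAIM (what is proved, stated in full; the proofs are below) =====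
def Claim_equal_mock_ai_categorize : Prop := ∀ (filename : String) (mime_type : String), Dom_mock_ai_categorize filename mime_type → Spec_mock_ai_categorize filename mime_type (mock_ai_categorize filename mime_type)

-- ===== LEMMAS AND PROOFS =====

-- the running-minimum step over an optional accumulator
def pvStep (acc : Option Int) (x : Int) : Option Int :=
  some (match acc with | none => x | some j => min j x)

-- Python's min over a (possibly empty) hit list IS the option-fold of pvStep
theorem pv_min?_eq_fold (l : List Int) :
    PySem.List.min? l (fun y => y) = l.foldl pvStep none := by
  cases l with
  | nil => rfl
  | cons x t =>
    rw [PySem.List.min?_id_cons]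
    suffices h : ∀ (t : List Int) (x : Int), t.foldl pvStep (some x) = some (t.foldl min x) by
      simpa [pvStep] using (h t x).symm
    intro t
    induction t with
    | nil => intro x; rfl
    | cons y s ih => intro x; simp [List.foldl, pvStep, ih]

-- one keyword group (all keywords carrying the same priority i) contributes i iff any keyword matches
theorem pv_group (kws : List String) (i : Int) (fl : String) (acc : Option Int) :
    (((kws.map (fun k => (k, i))).filter (fun kp => PySem.Str.isIn kp.1 fl)).map Prod.snd).foldl pvStep acc
      = if kws.any (fun kw => PySem.Str.isIn kw fl) then pvStep acc i else acc := by
  induction kws generalizing acc with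
  | nil => rfl
  | cons k t ih =>
    by_cases h : PySem.Str.isIn k fl = true
    · simp only [List.map, List.filter, List.any, h]
      rw [List.foldl_cons, ih]
      cases ht : t.any (fun kw => PySem.Str.isIn kw fl) <;>
        cases acc <;> simp [pvStep]
    · simp only [List.map, List.filter, List.any, h]
      rw [ih]
      simp

-- ===== VERDICT (by name: the statement is the Claim_ definition above) =====
theorem mock_ai_categorize_spec : Claim_equal_mock_ai_categorize := by
  intro filename mime_type _
  unfold Spec_mock_ai_categorize mock_ai_categorize mock_ai_categorize_alt
  dsimp only
  rw [pv_min?_eq_fold]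
  have hsplit : pvKeywordPriority =
      (["render", "3d", "viz", "cgi", "visual"].map (fun k => (k, (0:Int)))) ++
      (["floor", "plan", "layout", "fp"].map (fun k => (k, (1:Int)))) ++
      (["elevation", "elev", "facade", "front", "side"].map (fun k => (k, (2:Int)))) ++
      (["site", "photo", "construction", "progress", "img"].map (fun k => (k, (3:Int)))) ++
      (["sketch", "concept", "hand", "draft"].map (fun k => (k, (4:Int)))) ++
      (["section", "cut", "cross"].map (fun k => (k, (5:Int)))) ++
      (["detail", "dtl", "node"].map (fun k => (k, (6:Int)))) := by rfl
  rw [hsplit]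
  simp only [List.filter_append, List.map_append, List.foldl_append]
  rw [pv_group, pv_group, pv_group, pv_group, pv_group, pv_group, pv_group]
  generalize (["render", "3d", "viz", "cgi", "visual"].any (fun kw => PySem.Str.isIn kw (PySem.Str.lower filename))) = b0
  generalize (["floor", "plan", "layout", "fp"].any (fun kw => PySem.Str.isIn kw (PySem.Str.lower filename))) = b1
  generalize (["elevation", "elev", "facade", "front", "side"].any (fun kw => PySem.Str.isIn kw (PySem.Str.lower filename))) = b2
  generalize (["site", "photo", "construction", "progress", "img"].any (fun kw => PySem.Str.isIn kw (PySem.Str.lower filename))) = b3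
  generalize (["sketch", "concept", "hand", "draft"].any (fun kw => PySem.Str.isIn kw (PySem.Str.lower filename))) = b4
  generalize (["section", "cut", "cross"].any (fun kw => PySem.Str.isIn kw (PySem.Str.lower filename))) = b5
  generalize (["detail", "dtl", "node"].any (fun kw => PySem.Str.isIn kw (PySem.Str.lower filename))) = b6
  cases b0 <;> cases b1 <;> cases b2 <;> cases b3 <;> cases b4 <;> cases b5 <;> cases b6 <;> rfl
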